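-- pv_equiv track=rewrite | github.com/Vedant988/Fermions-Assignment---EDA-RAG | systems_engineer.py | _seq_encoding
-- ===== SOURCE A (Python) =====
-- def _seq_encoding(items: list[str]) -> dict[str, int]:
--     """Assign sequential non-overlapping integers to a list of unique items."""
--     seen = {}
--     result = {}
--     for item in items:
--         if item in seen:
--             continue
--         seen[item] = True
--         result[item] = len(result)
--     return result
-- ===== SOURCE B (Python) =====
-- def _seq_encoding(items: list[str]) -> dict[str, int]:
--     """Assign sequential non-overlapping integers to a list of unique items."""
--     # Closed-form per position, no running state: an item enters the map at
--     # its first occurrence i, and its code is the number of distinct items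
--     # strictly before position i.
--     return {x: len(set(items[:i]))
--             for i, x in enumerate(items)
--             if x not in items[:i]}
-- ===== Notes on version B (the rewrite author's own statement) =====
-- stated objective: alternative
-- what changed: Replaces A's stateful single pass (a seen-dict plus an index counter read off len(result)) by a stateless per-position closed form: for each position i whose item does not occur in items[:i], the code is len(set(items[:i])), the number of distinct items strictly before i.
import Mathlib
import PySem

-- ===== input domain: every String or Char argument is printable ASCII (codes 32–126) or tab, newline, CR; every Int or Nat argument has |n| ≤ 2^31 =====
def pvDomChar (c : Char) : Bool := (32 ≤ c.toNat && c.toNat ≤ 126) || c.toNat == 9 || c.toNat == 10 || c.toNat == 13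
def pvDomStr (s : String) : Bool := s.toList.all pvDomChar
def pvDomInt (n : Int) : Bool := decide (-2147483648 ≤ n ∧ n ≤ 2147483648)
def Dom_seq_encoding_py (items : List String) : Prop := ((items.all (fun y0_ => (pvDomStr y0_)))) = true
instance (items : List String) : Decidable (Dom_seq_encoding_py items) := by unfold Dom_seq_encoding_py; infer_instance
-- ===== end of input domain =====

-- B replaces A's stateful pass (seen-dict + len(result) counter) by a stateless per-position
-- closed form: code of a first occurrence at i = number of distinct items before i. Same values.

-- ===== PORT A =====
-- one loop iteration of A: skip if seen, else record in both dicts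
def seqStep (st : PySem.Dict String Bool × PySem.Dict String Int) (item : String) :
    PySem.Dict String Bool × PySem.Dict String Int :=
  if st.1.contains item then st
  else (st.1.insert item true, st.2.insert item (st.2.size : Int))

def seq_encoding_py (items : List String) : List (String × Int) :=
  (items.foldl seqStep (PySem.Dict.empty, PySem.Dict.empty)).2.items

-- ===== PORT B =====
-- the dict comprehension: fold over enumerate(items), keeping (x, len(set(items[:i])))
-- when x not in items[:i]
def seqAltStep (items : List String) (d : PySem.Dict String Int) (p : Int × String) :
    PySem.Dict String Int :=
  if p.2 ∈ PySem.List.slice items none (some p.1) then d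
  else d.insert p.2 ((PySem.Set.ofList (PySem.List.slice items none (some p.1))).length : Int)

def seq_encoding_py_alt (items : List String) : List (String × Int) :=
  ((PySem.List.enumerate items).foldl (seqAltStep items) PySem.Dict.empty).items

-- ===== PRECONDITION & SPEC =====
def Spec_seq_encoding_py (items : List String) (out : List (String × Int)) : Prop := out = seq_encoding_py_alt items
instance (items : List String) (out : List (String × Int)) : Decidable (Spec_seq_encoding_py items out) := by unfold Spec_seq_encoding_py; infer_instance

-- ===== CLAIM (what is proved, stated in full; the proofs are below) =====
def Claim_equal_seq_encoding_py : Prop := ∀ (items : List String), Dom_seq_encoding_py items → Spec_seq_encoding_py items (seq_encoding_py items)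

-- ===== LEMMAS AND PROOFS =====

-- B's fold over the enumeration of a prefix only looks at slices inside that prefix
lemma altFold_congr_prefix (xs : List String) (x : String) (d : PySem.Dict String Int) :
    (PySem.List.enumerate xs).foldl (seqAltStep (xs ++ [x])) d
      = (PySem.List.enumerate xs).foldl (seqAltStep xs) d := by
  apply PySem.List.foldl_congr_mem
  intro acc p hp
  rcases (PySem.List.mem_enumerate_iff _ _ _).1 hp with ⟨k, hk, rfl⟩
  have ht : List.take k (xs ++ [x]) = List.take k xs :=
    List.take_append_of_le_length (le_of_lt hk)
  simp [seqAltStep, ht]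

-- the joint invariant, by induction from the back of the list
lemma main_inv (xs : List String) :
    (xs.foldl seqStep (PySem.Dict.empty, PySem.Dict.empty)).2
        = (PySem.List.enumerate xs).foldl (seqAltStep xs) PySem.Dict.empty
    ∧ (∀ y, (xs.foldl seqStep (PySem.Dict.empty, PySem.Dict.empty)).1.contains y
        = decide (y ∈ xs))
    ∧ (xs.foldl seqStep (PySem.Dict.empty, PySem.Dict.empty)).2.keys
        = PySem.Set.ofList xs := by
  induction xs using List.reverseRecOn with
  | nil => simp [PySem.List.enumerate_nil, PySem.Set.ofList]
  | append_singleton xs x ih =>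
    obtain ⟨h1, h2, h3⟩ := ih
    set st := xs.foldl seqStep (PySem.Dict.empty, PySem.Dict.empty) with hst
    have hfoldA : (xs ++ [x]).foldl seqStep (PySem.Dict.empty, PySem.Dict.empty)
        = seqStep st x := by rw [List.foldl_append]; rfl
    have henum : PySem.List.enumerate (xs ++ [x])
        = PySem.List.enumerate xs ++ [((0 : Int) + xs.length, x)] := by
      rw [PySem.List.enumerate_append]
      simp [PySem.List.enumerate_cons, PySem.List.enumerate_nil]
    have hfoldB : (PySem.List.enumerate (xs ++ [x])).foldl (seqAltStep (xs ++ [x])) PySem.Dict.empty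
        = seqAltStep (xs ++ [x]) st.2 ((0 : Int) + xs.length, x) := by
      rw [henum, List.foldl_append, altFold_congr_prefix, ← h1]
      rfl
    have hslice : PySem.List.slice (xs ++ [x]) none (some ((0 : Int) + (xs.length : Nat))) = xs := by
      simp [PySem.List.slice_to_natCast]
    by_cases hx : x ∈ xs
    · have hseen : st.1.contains x = true := by rw [h2]; simp [hx]
      have hAdd : PySem.Set.add (PySem.Set.ofList xs) x = PySem.Set.ofList xs := by
        simp [PySem.Set.add, PySem.Set.contains, PySem.Set.mem_ofList, hx]
      have hupd : PySem.Set.update (PySem.Set.ofList xs) [x]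
          = PySem.Set.add (PySem.Set.ofList xs) x := by
        simp [PySem.Set.update]
      refine ⟨?_, ?_, ?_⟩
      · rw [hfoldA, hfoldB]
        simp [seqStep, hseen, seqAltStep, hx]
      · intro y
        rw [hfoldA]
        simp only [seqStep, hseen, if_true]
        rw [h2 y]
        simp only [List.mem_append, List.mem_singleton]
        by_cases hy : y ∈ xs
        · simp [hy]
        · have hyx : y ≠ x := fun h => hy (h ▸ hx)
          simp [hy, hyx]
      · rw [hfoldA]
        simp only [seqStep, hseen, if_true]
        rw [h3, PySem.Set.ofList_append, hupd, hAdd]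
    · have hseen : st.1.contains x = false := by rw [h2]; simp [hx]
      have hres : st.2.contains x = false := by
        rw [PySem.Dict.contains_eq_decide_mem_keys, h3]
        simp [PySem.Set.mem_ofList, hx]
      have hsize : (st.2.size : Int) = ((PySem.Set.ofList xs).length : Int) := by
        have : st.2.keys.length = (PySem.Set.ofList xs).length := by rw [h3]
        simpa [PySem.Dict.keys, PySem.Dict.size] using congrArg Int.ofNat this
      refine ⟨?_, ?_, ?_⟩
      · rw [hfoldA, hfoldB]
        simp only [seqStep, hseen, Bool.false_eq_true, if_false, seqAltStep, hslice, hx,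
          if_false]
        rw [hsize]
      · intro y
        rw [hfoldA]
        simp only [seqStep, hseen, Bool.false_eq_true, if_false]
        rw [PySem.Dict.contains_insert, h2 y]
        by_cases hy : y = x <;> simp [hy]
      · rw [hfoldA]
        simp only [seqStep, hseen, Bool.false_eq_true, if_false]
        rw [PySem.Dict.keys_insert_of_not_contains _ _ hres, h3, PySem.Set.ofList_append]
        have hupd : PySem.Set.update (PySem.Set.ofList xs) [x]
            = PySem.Set.add (PySem.Set.ofList xs) x := by
          simp [PySem.Set.update]
        rw [hupd]
        simp [PySem.Set.add, PySem.Set.contains, PySem.Set.mem_ofList, hx]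

-- ===== VERDICT (by name: the statement is the Claim_ definition above) =====
theorem seq_encoding_py_spec : Claim_equal_seq_encoding_py := by
  intro items _
  show seq_encoding_py items = seq_encoding_py_alt items
  unfold seq_encoding_py seq_encoding_py_alt
  rw [(main_inv items).1]
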